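-- pv_equiv track=rewrite | github.com/vishxlshxrma/DSA | Arrays/Medium/Maximum Score From Subarray Minimums.py | pairWithMaxSum
-- ===== SOURCE A (Python) =====
-- def pairWithMaxSum(arr):
--     maxi = 0
--     sub = []
--
--     for i in range(len(arr)):
--         for j in range(i,len(arr)):
--             sub = arr[i:j+1]
--             sub.sort()
--             if (len(sub)>1):
--                 b = int(sub[0] + sub[1])
--             else:
--                 b = min(sub)
--             if maxi<b:
--                 maxi = b
--     return maxi
-- ===== SOURCE B (Python) =====
-- def pairWithMaxSum(arr):
--     # One pass: the best subarray value is a single element or an adjacent pair sum,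
--     # floored at 0 (A's initial maxi).
--     maxi = 0
--     prev = None
--     for x in arr:
--         if x > maxi:
--             maxi = x
--         if prev is not None and prev + x > maxi:
--             maxi = prev + x
--         prev = x
--     return maxi
-- ===== Notes on version B (the rewrite author's own statement) =====
-- stated objective: faster
-- what changed: Replaced the enumerate-all-subarrays-and-sort loop by a single pass that maxes each element and each adjacent-pair sum against 0, using the fact that the sum of the two smallest elements of any subarray is bounded by one of its adjacent pair sums.
import Mathlib
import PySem

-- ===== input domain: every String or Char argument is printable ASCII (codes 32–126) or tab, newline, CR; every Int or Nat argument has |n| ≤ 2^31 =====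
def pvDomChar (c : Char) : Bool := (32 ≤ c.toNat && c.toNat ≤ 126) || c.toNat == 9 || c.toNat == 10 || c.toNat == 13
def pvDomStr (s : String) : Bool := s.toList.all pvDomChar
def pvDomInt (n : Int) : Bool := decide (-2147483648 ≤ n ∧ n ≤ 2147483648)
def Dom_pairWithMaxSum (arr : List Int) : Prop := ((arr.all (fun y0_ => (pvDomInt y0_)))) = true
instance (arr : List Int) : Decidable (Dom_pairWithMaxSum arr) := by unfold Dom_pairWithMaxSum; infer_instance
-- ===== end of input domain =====

-- B replaces A's enumerate-every-subarray-and-sort search by a single left-to-right pass; return values proved equal.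

-- ===== PORT A =====
-- body of A's inner loop: sort the slice arr[i:j+1], add its two smallest (or take min of a single element)
def pvBodyA (arr : List Int) (i j : Int) : Int :=
  let sub := PySem.List.sorted (PySem.List.slice arr (some i) (some (j + 1))) (fun x => x) false
  if sub.length > 1 then
    PySem.List.pyGetD sub 0 0 + PySem.List.pyGetD sub 1 0   -- int(sub[0] + sub[1]); indices in range whenever this runs
  else
    (PySem.List.min? sub (fun x => x)).getD 0               -- min(sub); sub is nonempty whenever this runs

def pairWithMaxSum (arr : List Int) : Int :=
  (PySem.List.pyRange 0 (arr.length : Int) 1).foldl (fun maxi i =>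
    (PySem.List.pyRange i (arr.length : Int) 1).foldl (fun maxi j =>
      let b := pvBodyA arr i j
      if maxi < b then b else maxi) maxi) 0

-- ===== PORT B =====
-- single pass; state = (running max, previous element)
def pvStepB (st : Int × Option Int) (x : Int) : Int × Option Int :=
  let maxi := if x > st.1 then x else st.1
  let maxi := match st.2 with
    | some p => if p + x > maxi then p + x else maxi
    | none => maxi
  (maxi, some x)

def pairWithMaxSum_alt (arr : List Int) : Int :=
  (arr.foldl pvStepB ((0 : Int), (none : Option Int))).1

-- ===== PRECONDITION & SPEC =====
def Spec_pairWithMaxSum (arr : List Int) (out : Int) : Prop := out = pairWithMaxSum_alt arr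
instance (arr : List Int) (out : Int) : Decidable (Spec_pairWithMaxSum arr out) := by unfold Spec_pairWithMaxSum; infer_instance

-- ===== CLAIM (what is proved, stated in full; the proofs are below) =====
def Claim_equal_pairWithMaxSum : Prop := ∀ (arr : List Int), Dom_pairWithMaxSum arr → Spec_pairWithMaxSum arr (pairWithMaxSum arr)

-- ===== LEMMAS AND PROOFS =====

-- A's candidate list: pvBodyA over all pairs i ≤ j < n
def pvLA (arr : List Int) : List Int :=
  (PySem.List.pyRange 0 (arr.length : Int) 1).flatMap (fun i =>
    (PySem.List.pyRange i (arr.length : Int) 1).map (fun j => pvBodyA arr i j))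

-- B's candidate list: every element and every adjacent pair sum (prev element threaded through)
def pvCands : Option Int → List Int → List Int
  | _, [] => []
  | none, x :: xs => x :: pvCands (some x) xs
  | some p, x :: xs => x :: (p + x) :: pvCands (some x) xs

theorem pvIfMax (m b : Int) : (if m < b then b else m) = max m b := by
  rw [Int.max_def]; split_ifs <;> omega

theorem pvFoldlMaxLe (l : List Int) (init c : Int) (h0 : init ≤ c)
    (h : ∀ x ∈ l, x ≤ c) : l.foldl max init ≤ c := by
  rcases PySem.List.foldl_max_mem l init with he | hm
  · omega
  · exact h _ hm

theorem pvFoldlFlat {α : Type} (l : List α) (f : α → List Int) (init : Int) :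
    (l.flatMap f).foldl max init = l.foldl (fun a i => (f i).foldl max a) init := by
  induction l generalizing init with
  | nil => simp
  | cons x xs ih => simp [List.foldl_append, ih]

-- A is the running max (seeded with 0) of its candidate list
theorem pvAEq (arr : List Int) : pairWithMaxSum arr = (pvLA arr).foldl max 0 := by
  unfold pairWithMaxSum pvLA
  rw [pvFoldlFlat]
  simp only [List.foldl_map, pvIfMax]

-- B is the running max (seeded with 0) of its candidate list
theorem pvBFold (l : List Int) (m : Int) (p : Option Int) :
    (l.foldl pvStepB (m, p)).1 = (pvCands p l).foldl max m := by
  induction l generalizing m p with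
  | nil => cases p <;> simp [pvCands]
  | cons x xs ih =>
    cases p <;> simp only [pvCands, List.foldl_cons, pvStepB, gt_iff_lt, pvIfMax] <;> exact ih _ _

theorem pvBEq (arr : List Int) : pairWithMaxSum_alt arr = (pvCands none arr).foldl max 0 := by
  unfold pairWithMaxSum_alt
  exact pvBFold arr 0 none

-- the sum of the two smallest elements of a list is at most the sum of its first two elements
theorem pvTwoSmallest (a b : Int) (t : List Int) :
    PySem.List.pyGetD (PySem.List.sorted (a::b::t) (fun x => x) false) 0 0 +
    PySem.List.pyGetD (PySem.List.sorted (a::b::t) (fun x => x) false) 1 0 ≤ a + b := by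
  have hperm := PySem.List.sorted_perm (a::b::t) (fun x => x) false
  have hpw := PySem.List.sorted_pairwise (a::b::t) (fun x => x)
  have hlen := PySem.List.length_sorted (a::b::t) (fun x => x) false
  generalize hgen : PySem.List.sorted (a::b::t) (fun x => x) false = s at hperm hpw hlen ⊢
  simp only [List.length_cons] at hlen
  obtain ⟨c, s1, rfl⟩ : ∃ c s1, s = c :: s1 := by
    cases s with
    | nil => simp at hlen
    | cons c s1 => exact ⟨c, s1, rfl⟩
  obtain ⟨d, t', rfl⟩ : ∃ d t', s1 = d :: t' := by
    cases s1 with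
    | nil => simp at hlen
    | cons d t' => exact ⟨d, t', rfl⟩
  rw [List.pairwise_cons] at hpw
  obtain ⟨hc, hpw2⟩ := hpw
  rw [List.pairwise_cons] at hpw2
  obtain ⟨hd, _⟩ := hpw2
  have hca : c ≤ a := by
    have ha : a ∈ c :: d :: t' := hperm.mem_iff.2 (by simp)
    rcases List.mem_cons.1 ha with h | h
    · omega
    · exact hc _ h
  have hcb : c ≤ b := by
    have hb : b ∈ c :: d :: t' := hperm.mem_iff.2 (by simp)
    rcases List.mem_cons.1 hb with h | h
    · omega
    · exact hc _ h
  have hdab : d ≤ a ∨ d ≤ b := by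
    by_contra h
    push Not at h
    obtain ⟨ha, hb⟩ := h
    have hcount := hperm.countP_eq (fun x => decide (x < d))
    have h2 : List.countP (fun x => decide (x < d)) (a::b::t) ≥ 2 := by
      simp only [List.countP_cons, decide_eq_true_eq, if_pos ha, if_pos hb]
      omega
    have h1 : List.countP (fun x => decide (x < d)) (c::d::t') ≤ 1 := by
      rw [List.countP_cons, List.countP_cons]
      have ht' : List.countP (fun x => decide (x < d)) t' = 0 := by
        rw [List.countP_eq_zero]
        intro x hx
        simpa using not_lt.2 (hd x hx)
      simp only [ht', decide_eq_true_eq]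
      have : ¬ (d < d) := lt_irrefl d
      split_ifs <;> omega
    omega
  have h0 : PySem.List.pyGetD (c::d::t') 0 0 = c := PySem.List.pyGetD_zero_cons _ _ _
  have h1 : PySem.List.pyGetD (c::d::t') 1 0 = d := by
    rw [show (1:Int) = ((1:Nat):Int) by norm_num, PySem.List.pyGetD_natCast]; rfl
  rw [h0, h1]
  omega

-- A's candidate for the singleton subarray [k,k] is arr[k]
theorem pvBodySingle (arr : List Int) (k : Nat) (h : k < arr.length) :
    pvBodyA arr (k : Int) (k : Int) = arr[k] := by
  unfold pvBodyA
  have hc : ((k : Int) + 1) = ((k + 1 : Nat) : Int) := by push_cast; ring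
  rw [hc, PySem.List.slice_natCast]
  rw [List.drop_eq_getElem_cons h]
  have : k + 1 - k = 1 := by omega
  rw [this, List.take_succ_cons, List.take_zero]
  rw [PySem.List.sorted_eq_self_of_pairwise [arr[k]] _ (List.pairwise_singleton _ _)]
  simp only [List.length_cons, List.length_nil]
  rw [if_neg (by omega), PySem.List.min?_id_cons]
  rfl

-- the slice arr[k : k+m+2] starts with arr[k], arr[k+1]
theorem pvSliceTwo (arr : List Int) (k m : Nat) (h : k + 1 < arr.length) :
    PySem.List.slice arr (some (k : Int)) (some ((k : Int) + ((m : Int) + 2))) =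
      arr[k] :: arr[k+1] :: (arr.drop (k+2)).take m := by
  have hc : ((k : Int) + ((m : Int) + 2)) = ((k + (m + 2) : Nat) : Int) := by push_cast; ring
  rw [hc, PySem.List.slice_natCast]
  rw [List.drop_eq_getElem_cons (by omega : k < arr.length)]
  rw [show arr.drop (k+1) = arr[k+1] :: arr.drop (k+2) from List.drop_eq_getElem_cons h]
  have : k + (m + 2) - k = m + 2 := by omega
  rw [this, List.take_succ_cons, List.take_succ_cons]

-- A's candidate for the adjacent subarray [k,k+1] is exactly arr[k] + arr[k+1]
theorem pvBodyAdj (arr : List Int) (k : Nat) (h : k + 1 < arr.length) :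
    pvBodyA arr (k : Int) ((k : Int) + 1) = arr[k] + arr[k+1] := by
  unfold pvBodyA
  have hc : ((k : Int) + 1 + 1) = ((k : Int) + (((0 : Nat) : Int) + 2)) := by push_cast; ring
  rw [hc, pvSliceTwo arr k 0 h]
  simp only [List.take_zero]
  have hperm := PySem.List.sorted_perm [arr[k], arr[k+1]] (fun x => x) false
  have hlen := PySem.List.length_sorted [arr[k], arr[k+1]] (fun x => x) false
  generalize hgen : PySem.List.sorted [arr[k], arr[k+1]] (fun x => x) false = s at hperm hlen ⊢
  obtain ⟨c, d, rfl⟩ := List.length_eq_two.1 (by simpa using hlen)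
  have hsum : c + d = arr[k] + arr[k+1] := by
    have := hperm.sum_eq
    simpa using this
  rw [if_pos (by simp)]
  rw [PySem.List.pyGetD_zero_cons]
  have h1 : PySem.List.pyGetD [c, d] 1 0 = d := by
    rw [show (1:Int) = ((1:Nat):Int) by norm_num, PySem.List.pyGetD_natCast]; rfl
  rw [h1]; exact hsum

-- A's candidate for any longer subarray [k,j] is at most arr[k] + arr[k+1]
theorem pvBodyPairLe (arr : List Int) (k : Nat) (j : Int) (h1 : k + 1 < arr.length)
    (hij : (k : Int) < j) :
    pvBodyA arr (k : Int) j ≤ arr[k] + arr[k+1] := by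
  unfold pvBodyA
  have hc : j + 1 = (k : Int) + (((j - (k:Int) - 1).toNat : Int) + 2) := by
    have : ((j - (k:Int) - 1).toNat : Int) = j - (k:Int) - 1 := Int.toNat_of_nonneg (by omega)
    omega
  rw [hc, pvSliceTwo arr k _ h1]
  have hlen := PySem.List.length_sorted
    (arr[k] :: arr[k+1] :: (arr.drop (k+2)).take ((j - (k:Int) - 1).toNat)) (fun x => x) false
  rw [if_pos (by rw [hlen]; simp)]
  exact pvTwoSmallest _ _ _

theorem pvMemCands (arr : List Int) (x : Int) (hx : x ∈ arr) : ∀ p, x ∈ pvCands p arr := by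
  induction arr with
  | nil => simp at hx
  | cons y ys ih =>
    intro p
    rcases List.mem_cons.1 hx with rfl | h
    · cases p <;> simp [pvCands]
    · have := ih h (some y)
      cases p <;> simp [pvCands] <;> tauto

theorem pvAdjMemCands (arr : List Int) (k : Nat) (h : k + 1 < arr.length) :
    ∀ p, arr[k] + arr[k+1] ∈ pvCands p arr := by
  induction arr generalizing k with
  | nil => simp at h
  | cons y ys ih =>
    intro p
    cases k with
    | zero =>
      simp only [List.length_cons] at h
      cases ys with
      | nil => simp at h
      | cons z zs =>
        simp only [List.getElem_cons_zero, List.getElem_cons_succ]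
        cases p <;> simp [pvCands]
    | succ k' =>
      have h' : k' + 1 < ys.length := by simp at h; omega
      have := ih k' h' (some y)
      simp only [List.getElem_cons_succ]
      cases p <;> simp [pvCands] <;> tauto

theorem pvCandsCases (arr : List Int) (p : Option Int) (c : Int) (h : c ∈ pvCands p arr) :
    (∃ (k : Nat) (hk : k < arr.length), c = arr[k]) ∨
    (∃ (k : Nat) (hk : k + 1 < arr.length), c = arr[k] + arr[k+1]) ∨
    (∃ q, p = some q ∧ ∃ (h0 : 0 < arr.length), c = q + arr[0]) := by
  induction arr generalizing p with
  | nil => cases p <;> simp [pvCands] at h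
  | cons y ys ih =>
    have hstep : c = y ∨ (∃ q, p = some q ∧ c = q + y) ∨ c ∈ pvCands (some y) ys := by
      cases p with
      | none => rcases List.mem_cons.1 h with h1 | h1
                · exact Or.inl h1
                · exact Or.inr (Or.inr h1)
      | some q =>
        rcases List.mem_cons.1 h with h1 | h1
        · exact Or.inl h1
        · rcases List.mem_cons.1 h1 with h2 | h2
          · exact Or.inr (Or.inl ⟨q, rfl, h2⟩)
          · exact Or.inr (Or.inr h2)
    rcases hstep with rfl | ⟨q, rfl, rfl⟩ | hrec
    · exact Or.inl ⟨0, by simp, by simp⟩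
    · exact Or.inr (Or.inr ⟨q, rfl, by simp, by simp⟩)
    · rcases ih (some y) hrec with ⟨k, hk, rfl⟩ | ⟨k, hk, rfl⟩ | ⟨q, hq, h0, rfl⟩
      · exact Or.inl ⟨k + 1, by simpa using Nat.succ_lt_succ hk, by simp⟩
      · exact Or.inr (Or.inl ⟨k + 1, by simp; omega, by simp⟩)
      · injection hq with hqy
        subst hqy
        refine Or.inr (Or.inl ⟨0, by simp; omega, ?_⟩)
        simp

theorem pvBodyMemLA (arr : List Int) (i j : Int) (h0 : 0 ≤ i) (hij : i ≤ j)
    (hj : j < (arr.length : Int)) : pvBodyA arr i j ∈ pvLA arr := by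
  unfold pvLA
  rw [List.mem_flatMap]
  exact ⟨i, PySem.List.mem_pyRange_one.2 ⟨h0, by omega⟩,
    List.mem_map.2 ⟨j, PySem.List.mem_pyRange_one.2 ⟨hij, hj⟩, rfl⟩⟩

theorem pvMaxEq (arr : List Int) : (pvLA arr).foldl max 0 = (pvCands none arr).foldl max 0 := by
  apply le_antisymm
  · apply pvFoldlMaxLe _ _ _ (PySem.List.le_foldl_max _ 0).1
    intro x hx
    unfold pvLA at hx
    rw [List.mem_flatMap] at hx
    obtain ⟨i, hi, hx⟩ := hx
    rw [List.mem_map] at hx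
    obtain ⟨j, hj, rfl⟩ := hx
    rw [PySem.List.mem_pyRange_one] at hi hj
    have hk : i = ((i.toNat : Nat) : Int) := (Int.toNat_of_nonneg hi.1).symm
    by_cases hij : i = j
    · subst hij
      have hkl : i.toNat < arr.length := by omega
      rw [hk, pvBodySingle arr i.toNat hkl]
      exact (PySem.List.le_foldl_max _ 0).2 _ (pvMemCands arr _ (List.getElem_mem hkl) none)
    · have hlt : i < j := lt_of_le_of_ne hj.1 hij
      have h1 : i.toNat + 1 < arr.length := by omega
      calc pvBodyA arr i j ≤ arr[i.toNat] + arr[i.toNat+1] := by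
            conv_lhs => rw [hk]
            exact pvBodyPairLe arr i.toNat j h1 (by omega)
        _ ≤ _ := (PySem.List.le_foldl_max _ 0).2 _ (pvAdjMemCands arr i.toNat h1 none)
  · apply pvFoldlMaxLe _ _ _ (PySem.List.le_foldl_max _ 0).1
    intro c hc
    rcases pvCandsCases arr none c hc with ⟨k, hk, rfl⟩ | ⟨k, hk, rfl⟩ | ⟨q, hq, _⟩
    · rw [← pvBodySingle arr k hk]
      exact (PySem.List.le_foldl_max _ 0).2 _
        (pvBodyMemLA arr k k (by omega) le_rfl (by omega))
    · rw [← pvBodyAdj arr k hk]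
      exact (PySem.List.le_foldl_max _ 0).2 _
        (pvBodyMemLA arr k ((k : Int) + 1) (by omega) (by omega) (by omega))
    · cases hq

-- ===== VERDICT (by name: the statement is the Claim_ definition above) =====
theorem pairWithMaxSum_spec : Claim_equal_pairWithMaxSum := by
  intro arr _
  show pairWithMaxSum arr = pairWithMaxSum_alt arr
  rw [pvAEq, pvBEq, pvMaxEq]
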